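-- pv_equiv track=rewrite | github.com/MrBrantCode/unitest_baseline | mut_generate/mist_train_cf/cf_82293/solution.py | calculate_products
-- ===== SOURCE A (Python) =====
-- from functools import reduce
-- import operator
--
-- def calculate_products(array):
--     # Initialize total_product and depth_sums_product
--     total_product = None
--     depth_sums_product = None
--
--     # Flatten the 3D array into 1D for calculating total_product
--     flattened_array = [num for sublist1 in array for sublist2 in sublist1 for num in sublist2]
--
--     # Calculate total_product (product of all elements)
--     if flattened_array:
--         total_product = reduce(operator.mul, flattened_array, 1)
--
--     # Calculate sums at each depth level
--     depth_sums = [sum(map(sum, sublist)) for sublist in array]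
--
--     # Calculate depth_sums_product
--     depth_sums_product = reduce(operator.mul, depth_sums, 1) if depth_sums else None
--
--     return total_product, depth_sums_product
-- ===== SOURCE B (Python) =====
-- def _mul_opt(a, b):
--     # monoid combine for "product of scalars, None = no scalars"
--     if a is None:
--         return b
--     if b is None:
--         return a
--     return a * b
--
--
-- def _row(nums):
--     # (optional product, sum) over a flat list of ints, divide and conquer
--     n = len(nums)
--     if n == 0:
--         return (None, 0)
--     if n == 1:
--         return (nums[0], nums[0])
--     m = n // 2
--     lp, ls = _row(nums[:m])
--     rp, rs = _row(nums[m:])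
--     return (_mul_opt(lp, rp), ls + rs)
--
--
-- def _group(sub):
--     # (optional product of scalars, sum of scalars) over one depth level
--     n = len(sub)
--     if n == 0:
--         return (None, 0)
--     if n == 1:
--         return _row(sub[0])
--     m = n // 2
--     lp, ls = _group(sub[:m])
--     rp, rs = _group(sub[m:])
--     return (_mul_opt(lp, rp), ls + rs)
--
--
-- def _outer(array):
--     # (optional product of all scalars, product of depth-level sums)
--     n = len(array)
--     if n == 1:
--         return _group(array[0])
--     m = n // 2
--     lp, ld = _outer(array[:m])
--     rp, rd = _outer(array[m:])
--     return (_mul_opt(lp, rp), ld * rd)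
--
--
-- def calculate_products(array):
--     if not array:
--         return (None, None)
--     p, d = _outer(array)
--     return (p, d)
-- ===== Notes on version B (the rewrite author's own statement) =====
-- stated objective: alternative
-- what changed: Divide-and-conquer: each level is recursively split in halves and the halves' results are merged (an optional-product monoid for the scalar product where None means 'no scalars seen', plain sum/product for depth sums), replacing A's flatten comprehension plus two reduce passes.
import Mathlib
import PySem

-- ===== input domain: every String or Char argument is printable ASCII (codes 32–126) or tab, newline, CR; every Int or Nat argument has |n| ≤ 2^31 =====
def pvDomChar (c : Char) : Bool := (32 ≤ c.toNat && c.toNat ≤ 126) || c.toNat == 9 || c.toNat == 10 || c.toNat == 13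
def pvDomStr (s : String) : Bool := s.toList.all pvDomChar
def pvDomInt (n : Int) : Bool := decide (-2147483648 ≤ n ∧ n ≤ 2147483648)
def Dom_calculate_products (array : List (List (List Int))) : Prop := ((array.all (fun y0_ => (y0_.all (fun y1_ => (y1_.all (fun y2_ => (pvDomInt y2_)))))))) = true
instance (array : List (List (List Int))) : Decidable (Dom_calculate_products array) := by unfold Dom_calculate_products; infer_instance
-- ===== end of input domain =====

-- B replaces A's flatten comprehension + two reduces with a divide-and-conquer reduction (split each level in halves, merge with an optional-product monoid); objective: alternative, same cost.

-- ===== PORT A =====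
def calculate_products (array : List (List (List Int))) : Option Int × Option Int :=
  -- flattened_array = [num for sublist1 in array for sublist2 in sublist1 for num in sublist2]
  let flattened := array.flatMap (fun sublist1 => sublist1.flatMap (fun sublist2 => sublist2))
  -- total_product = reduce(mul, flattened, 1) if flattened else None
  let total_product : Option Int := if flattened ≠ [] then some (flattened.foldl (· * ·) 1) else none
  -- depth_sums = [sum(map(sum, sublist)) for sublist in array]
  let depth_sums := array.map (fun sublist => (sublist.map (fun l => l.foldl (· + ·) 0)).foldl (· + ·) 0)
  -- depth_sums_product = reduce(mul, depth_sums, 1) if depth_sums else None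
  let depth_sums_product : Option Int := if depth_sums ≠ [] then some (depth_sums.foldl (· * ·) 1) else none
  (total_product, depth_sums_product)

-- ===== PORT B =====
-- _mul_opt: if a is None: return b; if b is None: return a; return a * b
def pvMulOpt (a b : Option Int) : Option Int :=
  match a, b with
  | none, b => b
  | some x, none => some x
  | some x, some y => some (x * y)

-- _row: divide-and-conquer (optional product, sum) over a flat list
-- (nums[:m]/nums[m:] with 0 ≤ m ≤ len are exactly List.take/List.drop)
def pvRow : List Int → Option Int × Int
  | [] => (none, 0)
  | [x] => (some x, x)
  | x :: y :: rest =>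
    let nums := x :: y :: rest
    let m := nums.length / 2
    let l := pvRow (nums.take m)
    let r := pvRow (nums.drop m)
    (pvMulOpt l.1 r.1, l.2 + r.2)
termination_by nums => nums.length
decreasing_by
  · simp; omega
  · simp; omega

-- _group: divide-and-conquer over one depth level
def pvGroup : List (List Int) → Option Int × Int
  | [] => (none, 0)
  | [r] => pvRow r
  | x :: y :: rest =>
    let sub := x :: y :: rest
    let m := sub.length / 2
    let l := pvGroup (sub.take m)
    let r := pvGroup (sub.drop m)
    (pvMulOpt l.1 r.1, l.2 + r.2)
termination_by sub => sub.length
decreasing_by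
  · simp; omega
  · simp; omega

-- _outer: divide-and-conquer over the outer array (caller guarantees nonempty;
-- the [] case returns the merge identities, matching _outer's n == 0 fallthrough never taken)
def pvOuter : List (List (List Int)) → Option Int × Int
  | [] => (none, 1)
  | [g] => pvGroup g
  | x :: y :: rest =>
    let arr := x :: y :: rest
    let m := arr.length / 2
    let l := pvOuter (arr.take m)
    let r := pvOuter (arr.drop m)
    (pvMulOpt l.1 r.1, l.2 * r.2)
termination_by arr => arr.length
decreasing_by
  · simp; omega
  · simp; omega

def calculate_products_alt (array : List (List (List Int))) : Option Int × Option Int :=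
  if array = [] then (none, none)
  else
    let pd := pvOuter array
    (pd.1, some pd.2)

-- ===== PRECONDITION & SPEC =====
def Spec_calculate_products (array : List (List (List Int))) (out : Option Int × Option Int) : Prop := out = calculate_products_alt array
instance (array : List (List (List Int))) (out : Option Int × Option Int) : Decidable (Spec_calculate_products array out) := by unfold Spec_calculate_products; infer_instance

-- ===== CLAIM (what is proved, stated in full; the proofs are below) =====
def Claim_equal_calculate_products : Prop := ∀ (array : List (List (List Int))), Dom_calculate_products array → Spec_calculate_products array (calculate_products array)

-- ===== LEMMAS AND PROOFS =====

-- the optional product "None = no scalars"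
def optP (l : List Int) : Option Int := if l = [] then none else some l.prod

lemma pvMulOpt_optP (a b : List Int) :
    pvMulOpt (optP a) (optP b) = optP (a ++ b) := by
  cases a <;> cases b <;> simp [pvMulOpt, optP, mul_assoc]

lemma pvRow_eq (l : List Int) : pvRow l = (optP l, l.sum) := by
  induction l using pvRow.induct with
  | case1 => simp [pvRow, optP]
  | case2 x => simp [pvRow, optP]
  | case3 x y rest nums m ih1 ih2 =>
    rw [pvRow]
    rw [ih1, ih2]
    simp only [pvMulOpt_optP, List.take_append_drop, List.sum_take_add_sum_drop]
    rfl

lemma pvGroup_eq (g : List (List Int)) :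
    pvGroup g = (optP g.flatten, g.flatten.sum) := by
  induction g using pvGroup.induct with
  | case1 => simp [pvGroup, optP]
  | case2 r => simp [pvGroup, pvRow_eq]
  | case3 x y rest sub m ih1 ih2 =>
    rw [pvGroup]
    rw [ih1, ih2]
    simp only [pvMulOpt_optP]
    rw [← List.flatten_append, List.take_append_drop]
    have h2 : (List.take m sub).flatten.sum + (List.drop m sub).flatten.sum
        = sub.flatten.sum := by
      conv_rhs => rw [← List.take_append_drop m sub]
      simp
    rw [h2]

lemma pvOuter_eq (a : List (List (List Int))) :
    pvOuter a = (optP (a.flatMap (fun s => s.flatten)),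
                 (a.map (fun s => s.flatten.sum)).prod) := by
  induction a using pvOuter.induct with
  | case1 => simp [pvOuter, optP]
  | case2 g => simp [pvOuter, pvGroup_eq]
  | case3 x y rest arr m ih1 ih2 =>
    rw [pvOuter]
    rw [ih1, ih2]
    simp only [pvMulOpt_optP]
    rw [← List.flatMap_append, List.take_append_drop]
    have h2 : (List.map (fun s => s.flatten.sum) (List.take m arr)).prod
        * (List.map (fun s => s.flatten.sum) (List.drop m arr)).prod
        = (List.map (fun s => s.flatten.sum) arr).prod := by
      conv_rhs => rw [← List.take_append_drop m arr]
      simp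
    rw [h2]

lemma foldl_mul_one (l : List Int) : l.foldl (· * ·) 1 = l.prod := by
  simp [List.prod_eq_foldl]

lemma foldl_add_zero (l : List Int) : l.foldl (· + ·) 0 = l.sum := by
  simp [List.sum_eq_foldl]

-- ===== VERDICT (by name: the statement is the Claim_ definition above) =====
theorem calculate_products_spec : Claim_equal_calculate_products := by
  intro array _
  show _ = _
  simp only [calculate_products, calculate_products_alt, pvOuter_eq,
    foldl_mul_one, foldl_add_zero]
  have hf : array.flatMap (fun s1 => s1.flatMap (fun s2 => s2))
      = array.flatMap (fun s => s.flatten) := by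
    simp only [List.flatMap_id']
  have hds : (array.map (fun sublist => (sublist.map (fun l => l.sum)).sum))
      = array.map (fun s => s.flatten.sum) := by
    apply List.map_congr_left
    intro s _
    simp [List.sum_flatten]
  by_cases h : array = []
  · subst h; simp
  · simp only [h, hf, hds, optP]
    refine Prod.ext ?_ ?_
    · by_cases hfl : array.flatMap (fun s => s.flatten) = [] <;> simp [hfl]
    · simp [h]
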